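-- pv_equiv track=rewrite | github.com/masahiro-999/atcoder-workspace | keyence2019/C/main.py | solve
-- ===== SOURCE A (Python) =====
-- def solve(N: int, A: "List[int]", B: "List[int]"):
--     a = [a-b for a,b in zip(A,B)]
--     c = 0
--     a_sum = 0
--     for i in a:
--         if i < 0:
--             a_sum += -i
--             c += 1
--     a.sort(reverse=True)
--     if a_sum == 0:
--         return 0
--     ans = -1
--     for i in a:
--         a_sum += -i
--         c += 1
--         if a_sum <= 0:
--             ans = c
--             break
--         if i < 0:
--             break
--     return ans
-- ===== SOURCE B (Python) =====
-- def solve(N, A, B):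
--     d = [x - y for x, y in zip(A, B)]
--     deficit = sum(-v for v in d if v < 0)
--     if deficit == 0:
--         return 0
--     c = sum(1 for v in d if v < 0)
--     pos = [v for v in d if v > 0]
--     total = 0
--     while pos:
--         m = max(pos)
--         pos.remove(m)
--         total += m
--         c += 1
--         if total >= deficit:
--             return c
--     return -1
-- ===== Notes on version B (the rewrite author's own statement) =====
-- stated objective: alternative
-- what changed: B computes the deficit and negative-count by direct filtered sums, then greedily selects the largest positive diff by repeated max+remove from the positives only, comparing a growing prefix total against the fixed deficit, instead of A's full in-place descending sort of all diffs followed by a stateful break-laden scan that also walks zeros and negatives.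
import Mathlib
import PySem

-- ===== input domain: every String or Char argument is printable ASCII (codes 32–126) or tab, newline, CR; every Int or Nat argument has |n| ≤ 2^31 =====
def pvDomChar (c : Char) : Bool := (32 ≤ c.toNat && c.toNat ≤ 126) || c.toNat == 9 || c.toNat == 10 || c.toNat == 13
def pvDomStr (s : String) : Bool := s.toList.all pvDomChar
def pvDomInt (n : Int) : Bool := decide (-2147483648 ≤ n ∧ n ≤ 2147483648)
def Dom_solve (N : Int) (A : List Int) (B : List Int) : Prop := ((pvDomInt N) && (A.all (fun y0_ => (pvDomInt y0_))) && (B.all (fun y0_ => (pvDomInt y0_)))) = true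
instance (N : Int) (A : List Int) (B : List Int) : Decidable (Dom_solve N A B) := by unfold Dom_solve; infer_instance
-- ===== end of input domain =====

-- B replaces A's full descending sort + break-laden scan by filtered sums and repeated max-selection from the positive diffs only (objective: alternative).


-- ===== PORT A =====
-- second loop of A: for i in a: a_sum += -i; c += 1; if a_sum <= 0: ans = c; break; if i < 0: break
def solveLoop2 : List Int → Int → Int → Int
  | [], _c, _s => -1
  | i :: t, c, s =>
    let s' := s + (-i)
    let c' := c + 1
    if s' ≤ 0 then c'
    else if i < 0 then -1
    else solveLoop2 t c' s'

def solve (N : Int) (A : List Int) (B : List Int) : Int :=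
  let a := (A.zip B).map (fun p => p.1 - p.2)
  let cs := a.foldl (fun (st : Int × Int) i => if i < 0 then (st.1 + 1, st.2 + (-i)) else st) (0, 0)
  let a2 := PySem.List.sorted a (fun x => x) true
  if cs.2 = 0 then 0 else solveLoop2 a2 cs.1 cs.2

-- ===== PORT B =====
-- while pos: m = max(pos); pos.remove(m); total += m; c += 1; if total >= deficit: return c
-- (max? none ⟺ pos = [] ends the while; remove? cannot be none since m ∈ pos — the none branch is unreachable)
def solveAltLoop (pos : List Int) (c : Int) (total : Int) (deficit : Int) : Int :=
  match PySem.List.max? pos (fun v => v) with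
  | none => -1
  | some m =>
    match hr : PySem.List.remove? pos m with
    | none => -1
    | some pos' =>
      let total' := total + m
      let c' := c + 1
      if total' ≥ deficit then c' else solveAltLoop pos' c' total' deficit
termination_by pos.length
decreasing_by
  have hmem : m ∈ pos := by
    by_contra h
    rw [(PySem.List.remove?_eq_none_iff pos m).2 h] at hr
    simp at hr
  rw [PySem.List.remove?_eq_some_erase pos m hmem] at hr
  cases hr
  have h1 := List.length_erase_of_mem hmem
  have h2 : 0 < pos.length := List.length_pos_of_mem hmem
  omega

def solve_alt (N : Int) (A : List Int) (B : List Int) : Int :=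
  let d := (A.zip B).map (fun p => p.1 - p.2)
  let deficit := (d.filter (fun v => decide (v < 0))).foldl (fun s v => s + (-v)) 0
  if deficit = 0 then 0
  else
    let c : Int := ((d.filter (fun v => decide (v < 0))).length : Int)
    let pos := d.filter (fun v => decide (0 < v))
    solveAltLoop pos c 0 deficit

-- ===== PRECONDITION & SPEC =====
def Spec_solve (N : Int) (A : List Int) (B : List Int) (out : Int) : Prop := out = solve_alt N A B
instance (N : Int) (A : List Int) (B : List Int) (out : Int) : Decidable (Spec_solve N A B out) := by unfold Spec_solve; infer_instance

-- ===== CLAIM (what is proved, stated in full; the proofs are below) =====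
def Claim_equal_solve : Prop := ∀ (N : Int) (A : List Int) (B : List Int), Dom_solve N A B → Spec_solve N A B (solve N A B)

-- ===== LEMMAS AND PROOFS =====

-- the common greedy skeleton both loops reduce to (arguments: descending positives, count, remaining deficit)
def greedy : List Int → Int → Int → Int
  | [], _c, _s => -1
  | i :: t, c, s => if s - i ≤ 0 then c + 1 else greedy t (c + 1) (s - i)

theorem foldl_negadd (l : List Int) (a : Int) :
    l.foldl (fun s v => s + (-v)) a = a + l.foldl (fun s v => s + (-v)) 0 := by
  induction l generalizing a with
  | nil => simp
  | cons h t ih =>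
    simp only [List.foldl_cons]
    rw [ih (a + -h), ih (0 + -h)]
    ring

theorem drop_nonpos (l : List Int) (hpair : l.Pairwise (fun a b => b ≤ a)) :
    ∀ x ∈ l.dropWhile (fun v => decide (0 < v)) , x ≤ 0 := by
  induction l with
  | nil => simp
  | cons h t ih =>
    by_cases hh : 0 < h
    · rw [List.dropWhile_cons_of_pos (by simpa using hh)]
      exact ih (List.Pairwise.sublist (List.sublist_cons_self h t) hpair)
    · rw [List.dropWhile_cons_of_neg (by simpa using hh)]
      intro x hx
      rcases List.mem_cons.1 hx with rfl | hx'
      · omega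
      · have := (List.pairwise_cons.1 hpair).1 x hx'
        omega

theorem pairloop_eq (d : List Int) (c s : Int) :
    d.foldl (fun (st : Int × Int) i => if i < 0 then (st.1 + 1, st.2 + (-i)) else st) (c, s)
      = (c + ((d.filter (fun v => decide (v < 0))).length : Int),
         s + (d.filter (fun v => decide (v < 0))).foldl (fun a v => a + (-v)) 0) := by
  induction d generalizing c s with
  | nil => simp
  | cons i t ih =>
    by_cases hi : i < 0
    · simp only [List.foldl_cons, List.filter_cons, hi, decide_true, if_true]
      rw [ih]
      have hsh := foldl_negadd (t.filter (fun v => decide (v < 0))) (0 + -i)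
      rw [hsh]
      simp only [List.length_cons, Prod.mk.injEq]
      constructor
      · push_cast; ring
      · ring
    · simp only [List.foldl_cons, List.filter_cons, hi, decide_false]
      rw [ih]
      simp

theorem negsum_nonneg (d : List Int) :
    0 ≤ (d.filter (fun v => decide (v < 0))).foldl (fun a v => a + (-v)) 0 := by
  have key : ∀ (l : List Int) (a : Int), (∀ v ∈ l, v < 0) → 0 ≤ a →
      0 ≤ l.foldl (fun s v => s + (-v)) a := by
    intro l
    induction l with
    | nil => intro a _ ha; simpa using ha
    | cons h t ih =>
      intro a hmem ha
      simp only [List.foldl_cons]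
      exact ih _ (fun v hv => hmem v (List.mem_cons_of_mem _ hv))
        (by have := hmem h (List.mem_cons_self); omega)
  exact key _ 0 (fun v hv => by simpa using (List.of_mem_filter hv)) le_rfl

theorem loop2_nonpos (l : List Int) (c s : Int) (hl : ∀ x ∈ l, x ≤ 0) (hs : 0 < s) :
    solveLoop2 l c s = -1 := by
  induction l generalizing c s with
  | nil => rfl
  | cons i t ih =>
    have hi : i ≤ 0 := hl i (List.mem_cons_self)
    simp only [solveLoop2]
    rw [if_neg (by omega)]
    by_cases hneg : i < 0
    · rw [if_pos hneg]
    · rw [if_neg hneg]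
      exact ih _ _ (fun x hx => hl x (List.mem_cons_of_mem _ hx)) (by omega)

theorem loop2_split (l1 l2 : List Int) (c s : Int) (h1 : ∀ x ∈ l1, 0 < x)
    (h2 : ∀ x ∈ l2, x ≤ 0) (hs : 0 < s) :
    solveLoop2 (l1 ++ l2) c s = greedy l1 c s := by
  induction l1 generalizing c s with
  | nil =>
    simp only [List.nil_append, greedy]
    exact loop2_nonpos l2 c s h2 hs
  | cons i t ih =>
    have hi : 0 < i := h1 i (List.mem_cons_self)
    simp only [List.cons_append, solveLoop2, greedy]
    have harith : s + -i = s - i := by ring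
    rw [harith]
    by_cases hle : s - i ≤ 0
    · rw [if_pos hle, if_pos hle]
    · rw [if_neg hle, if_neg hle, if_neg (by omega)]
      exact ih _ _ (fun x hx => h1 x (List.mem_cons_of_mem _ hx)) (by omega)

-- sorted-descending lists of the same multiset are equal
theorem desc_eq_of_perm (l1 l2 : List Int) (hp : l1.Perm l2)
    (h1 : l1.Pairwise (fun a b => b ≤ a)) (h2 : l2.Pairwise (fun a b => b ≤ a)) :
    l1 = l2 := by
  have := PySem.List.eq_of_perm_of_pairwise_le_of_injective (l₁ := l1.reverse) (l₂ := l2.reverse)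
    (fun x : Int => x) (fun a b h => h)
    ((l1.reverse_perm).trans (hp.trans l2.reverse_perm.symm))
    (by rw [List.pairwise_reverse]; exact h1)
    (by rw [List.pairwise_reverse]; exact h2)
  exact List.reverse_injective this

-- the descending sort of d splits into the descending sort of its positives followed by nonpositives
theorem sorted_split (d : List Int) :
    ∃ l2, PySem.List.sorted d (fun x => x) true
        = PySem.List.sorted (d.filter (fun v => decide (0 < v))) (fun x => x) true ++ l2
      ∧ ∀ x ∈ l2, x ≤ 0 := by
  set p : Int → Bool := fun v => decide (0 < v) with hp
  set l := PySem.List.sorted d (fun x => x) true with hl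
  have hpair : l.Pairwise (fun a b => b ≤ a) := PySem.List.sorted_pairwise_rev d _
  have hsplit : l = l.takeWhile p ++ l.dropWhile p := (List.takeWhile_append_dropWhile).symm
  refine ⟨l.dropWhile p, ?_, ?_⟩
  · have h1pos : ∀ x ∈ l.takeWhile p, 0 < x := by
      intro x hx
      have := List.mem_takeWhile_imp hx
      simpa [hp] using this
    have h2np : ∀ x ∈ l.dropWhile p, x ≤ 0 := drop_nonpos l hpair
    have h1 : l.filter p = l.takeWhile p := by
      conv_lhs => rw [hsplit]
      rw [List.filter_append]
      have ht : (l.takeWhile p).filter p = l.takeWhile p :=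
        List.filter_eq_self.mpr (fun a ha => by simpa [hp] using h1pos a ha)
      have hd2 : (l.dropWhile p).filter p = [] := by
        rw [List.filter_eq_nil_iff]
        intro a ha
        have := h2np a ha
        simp [hp]; omega
      rw [ht, hd2, List.append_nil]
    have hperm : (l.takeWhile p).Perm (d.filter p) := by
      rw [← h1]
      exact (PySem.List.sorted_perm d _ true).filter p
    have hpair1 : (l.takeWhile p).Pairwise (fun a b => b ≤ a) := by
      rw [hsplit] at hpair
      exact (List.pairwise_append.1 hpair).1
    rw [← desc_eq_of_perm (l.takeWhile p) (PySem.List.sorted (d.filter p) (fun x => x) true)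
      (hperm.trans (PySem.List.sorted_perm _ _ true).symm) hpair1
      (PySem.List.sorted_pairwise_rev _ _)]
    exact hsplit
  · exact drop_nonpos l hpair

-- popping the max is taking the head of the descending sort
theorem sorted_pop (pos : List Int) (m : Int) (hm : PySem.List.max? pos (fun v => v) = some m) :
    PySem.List.sorted pos (fun x => x) true
      = m :: PySem.List.sorted (pos.erase m) (fun x => x) true := by
  have hmem : m ∈ pos := PySem.List.max?_mem hm
  apply desc_eq_of_perm
  · exact (PySem.List.sorted_perm pos _ true).trans
      ((List.perm_cons_erase hmem).trans
        ((PySem.List.sorted_perm (pos.erase m) _ true).cons m).symm)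
  · exact PySem.List.sorted_pairwise_rev pos _
  · rw [List.pairwise_cons]
    refine ⟨?_, PySem.List.sorted_pairwise_rev _ _⟩
    intro x hx
    have hx' : x ∈ pos := List.mem_of_mem_erase ((PySem.List.mem_sorted _ _ _ _).1 hx)
    exact PySem.List.max?_isMax hm x hx'

theorem loopB_eq_greedy (pos : List Int) (c total deficit : Int) :
    solveAltLoop pos c total deficit
      = greedy (PySem.List.sorted pos (fun x => x) true) c (deficit - total) := by
  suffices H : ∀ (n : Nat) (pos : List Int), pos.length ≤ n → ∀ (c total deficit : Int),
      solveAltLoop pos c total deficit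
        = greedy (PySem.List.sorted pos (fun x => x) true) c (deficit - total) by
    exact H pos.length pos le_rfl c total deficit
  intro n
  induction n with
  | zero =>
    intro pos hlen c total deficit
    have hnil : pos = [] := List.eq_nil_of_length_eq_zero (Nat.le_zero.1 hlen)
    subst hnil
    rw [solveAltLoop]
    simp [PySem.List.sorted, greedy, PySem.List.max?]
  | succ n ih =>
    intro pos hlen c total deficit
    cases hmax : PySem.List.max? pos (fun v => v) with
    | none =>
      have hnil : pos = [] := (PySem.List.max?_eq_none_iff _ _).1 hmax
      subst hnil
      rw [solveAltLoop]
      simp [PySem.List.sorted, greedy, PySem.List.max?]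
    | some m =>
      have hmem : m ∈ pos := PySem.List.max?_mem hmax
      have hrem : PySem.List.remove? pos m = some (pos.erase m) :=
        PySem.List.remove?_eq_some_erase pos m hmem
      rw [solveAltLoop, hmax]
      split
      next hr => simp at hr
      next pos' hr =>
      cases hr
      split
      next hr2 => rw [hrem] at hr2; simp at hr2
      next pos2 hr2 =>
      rw [hrem] at hr2
      cases hr2
      rw [sorted_pop pos m hmax]
      simp only [greedy]
      rcases le_or_gt deficit (total + m) with hge | hlt
      · rw [if_pos (by omega), if_pos (by omega)]
      · rw [if_neg (by omega), if_neg (by omega)]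
        have hlen' : (pos.erase m).length ≤ n := by
          have := List.length_erase_of_mem hmem
          omega
        rw [ih (pos.erase m) hlen' (c + 1) (total + m) deficit]
        congr 1
        omega

-- ===== VERDICT (by name: the statement is the Claim_ definition above) =====
theorem solve_spec : Claim_equal_solve := by
  intro N A B _
  show solve N A B = solve_alt N A B
  unfold solve solve_alt
  simp only [pairloop_eq, zero_add]
  set d := (A.zip B).map (fun p => p.1 - p.2) with hd
  set negsum := (d.filter (fun v => decide (v < 0))).foldl (fun a v => a + (-v)) 0 with hns
  by_cases hz : negsum = 0
  · rw [if_pos hz, if_pos hz]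
  · rw [if_neg hz, if_neg hz]
    have hpos : 0 < negsum := lt_of_le_of_ne (negsum_nonneg d) (Ne.symm hz)
    obtain ⟨l2, hsplit, hl2⟩ := sorted_split d
    rw [hsplit]
    rw [loop2_split _ l2 _ _ ?h1 hl2 hpos]
    · rw [loopB_eq_greedy]
      congr 1
      omega
    case h1 =>
      intro x hx
      have := (PySem.List.mem_sorted _ _ _ _).1 hx
      simpa using (List.of_mem_filter this)
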